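-- pv_equiv track=rewrite | github.com/lasse16/aoc_2021 | 10/task2.py | get_completion_string
-- ===== SOURCE A (Python) =====
-- opening_chunks = {
--     "(",
--     "[",
--     "{",
--     "<",
-- }
--
-- matching_chunks = {
--     ")": "(",
--     "]": "[",
--     "}": "{",
--     ">": "<",
--     "(": ")",
--     "[": "]",
--     "{": "}",
--     "<": ">",
-- }
--
-- def get_completion_string(line):
--     stack = []
--     for _char in line:
--         if _char in opening_chunks:
--             stack.append(_char)
--         else:
--             # closing char
--             if len(stack) == 0:
--                 return None
--             if stack.pop() != matching_chunks[_char]: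
--                 # wrongly matched closing char
--                 return None
--     if len(stack) == 0:
--         return None
--     return "".join([matching_chunks[opening_char] for opening_char in stack[::-1]])
-- ===== SOURCE B (Python) =====
-- matching_chunks = {
--     ")": "(",
--     "]": "[",
--     "}": "{",
--     ">": "<",
--     "(": ")",
--     "[": "]",
--     "{": "}",
--     "<": ">",
-- }
--
--
-- def get_completion_string(line):
--     s = "".join(line)
--     prev = None
--     while s != prev:
--         prev = s
--         for pair in ("()", "[]", "{}", "<>"):
--             s = s.replace(pair, "")
--     if not s:
--         # fully balanced line
--         return None
--     if any(c not in "([{<" for c in s):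
--         # a non-opening char survived the reduction: corrupted line
--         return None
--     # the remainder is the unmatched opening chars in order
--     return "".join(matching_chunks[c] for c in s[::-1])
-- ===== Notes on version B (the rewrite author's own statement) =====
-- stated objective: alternative
-- what changed: Replaces A's explicit stack scan by repeatedly deleting every adjacent matching open-close bracket pair with str.replace until the line stops changing, then classifying the irreducible remainder (empty = balanced, any non-opening char left = corrupted, otherwise the unmatched openers give the completion).
-- outside the precondition, e.g. on get_completion_string('()a'): A returns None, B returns None; on get_completion_string('(a'): A raises KeyError, B returns None
import Mathlib
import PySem

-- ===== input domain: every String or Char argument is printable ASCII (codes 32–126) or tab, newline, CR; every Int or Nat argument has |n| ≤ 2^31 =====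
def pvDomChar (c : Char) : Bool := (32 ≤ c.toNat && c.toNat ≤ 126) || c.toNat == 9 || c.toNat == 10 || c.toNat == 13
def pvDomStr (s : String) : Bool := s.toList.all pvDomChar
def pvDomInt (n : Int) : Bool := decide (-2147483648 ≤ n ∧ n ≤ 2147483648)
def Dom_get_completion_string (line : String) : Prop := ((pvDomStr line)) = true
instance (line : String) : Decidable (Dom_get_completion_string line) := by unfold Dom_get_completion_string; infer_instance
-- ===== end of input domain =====

-- B replaces A's explicit stack by repeated cancellation of adjacent matching bracket
-- pairs until a fixpoint (objective: alternative decomposition, not claimed faster).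

-- ===== PORT A =====
def openingChunks : PySem.Set Char := PySem.Set.ofList ['(', '[', '{', '<']

def matchingChunks : PySem.Dict Char Char :=
  PySem.Dict.ofList
    [(')', '('), (']', '['), ('}', '{'), ('>', '<'),
     ('(', ')'), ('[', ']'), ('{', '}'), ('<', '>')]

-- A's for-loop: remaining chars, stack (Python list, top at the end)
def goA : List Char → List Char → Option String
  | [], stack =>
      if stack.length = 0 then none
      else
        -- stack[::-1] is List.reverse (PySem.List.slice?_none_none_neg_one);
        -- matching_chunks[opening_char]: the .getD default is never used, the
        -- stack holds only keys of the dict (opening chars)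
        some (String.ofList (PySem.Chars.join []
          ((stack.reverse).map (fun o => [(matchingChunks.get? o).getD o]))))
  | c :: rest, stack =>
      if PySem.Set.contains openingChunks c then goA rest (stack ++ [c])
      else if stack.length = 0 then none
      else
        match PySem.List.pop? stack, matchingChunks.get? c with
        | some (top, stack'), some m =>
            if top ≠ m then none else goA rest stack'
        | _, _ => none  -- matching_chunks[_char] raises KeyError in Python: excluded by Pre_

def get_completion_string (line : String) : Option String := goA line.toList []

-- ===== PORT B =====
-- B-side helper used by the proofs AND by loopB's termination argument:
-- the effect of s.replace(o::c, "") as a two-at-a-time recursion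
def rep (o c : Char) : List Char → List Char
  | [] => []
  | [a] => [a]
  | a :: b :: t => if a = o ∧ b = c then rep o c t else a :: rep o c (b :: t)

theorem replace_go_eq (o c : Char) : ∀ (fuel : Nat) (l acc : List Char), l.length ≤ fuel →
    PySem.Chars.replace.go [o, c] [] fuel l acc = acc.reverse ++ rep o c l := by
  intro fuel
  induction fuel with
  | zero =>
      intro l acc h
      have : l = [] := List.eq_nil_of_length_eq_zero (Nat.le_zero.mp h)
      subst this
      simp [PySem.Chars.replace.go, rep]
  | succ n ih =>
      intro l acc h
      match l with
      | [] => simp [PySem.Chars.replace.go, rep]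
      | a :: t =>
        rw [PySem.Chars.replace.go]
        by_cases hpre : List.isPrefixOf [o, c] (a :: t) = true
        · obtain ⟨t', ht⟩ : ∃ t', a :: t = o :: c :: t' := by
            obtain ⟨r, hr⟩ := List.isPrefixOf_iff_prefix.mp hpre
            exact ⟨r, by simpa using hr.symm⟩
          simp only [hpre, if_pos]
          cases ht
          have hd : List.drop ([o, c]).length (o :: c :: t') = t' := by simp
          rw [hd, List.reverse_nil, List.nil_append, ih t' acc (by simp at h; omega)]
          simp [rep]
        · rw [if_neg hpre]
          rw [ih t (a :: acc) (by simp at h; omega)]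
          have : rep o c (a :: t) = a :: rep o c t := by
            match t with
            | [] => simp [rep]
            | b :: t2 =>
              rw [rep]
              rw [if_neg]
              intro ⟨h1, h2⟩
              subst h1; subst h2
              simp [List.isPrefixOf] at hpre
          rw [this]
          simp

theorem replace_eq_rep (o c : Char) (s : List Char) :
    PySem.Chars.replace s [o, c] [] = rep o c s := by
  have : PySem.Chars.replace s [o, c] [] = PySem.Chars.replace.go [o, c] [] s.length s [] := by
    rw [PySem.Chars.replace]
    simp
  rw [this, replace_go_eq o c s.length s [] le_rfl]
  simp

theorem rep_length_le (o c : Char) (s : List Char) : (rep o c s).length ≤ s.length := by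
  fun_induction rep o c s <;> simp_all <;> omega

theorem rep_eq_or_lt (o c : Char) (s : List Char) :
    rep o c s = s ∨ (rep o c s).length + 2 ≤ s.length := by
  fun_induction rep o c s with
  | case1 => left; rfl
  | case2 a => left; rfl
  | case3 a b t hcond ih =>
      right
      have := rep_length_le o c t
      simp only [List.length_cons]
      omega
  | case4 a b t hcond ih =>
      rcases ih with h1 | h2
      · left; rw [h1]
      · right; simp only [List.length_cons] at h2 ⊢; omega

-- one pass of B's while-loop body: the four replaces in order
def stepB (s : List Char) : List Char :=
  PySem.Chars.replace
    (PySem.Chars.replace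
      (PySem.Chars.replace
        (PySem.Chars.replace s ['(', ')'] []) ['[', ']'] []) ['{', '}'] []) ['<', '>'] []

theorem stepB_length_lt (s : List Char) (h : stepB s ≠ s) : (stepB s).length < s.length := by
  rw [stepB, replace_eq_rep, replace_eq_rep, replace_eq_rep, replace_eq_rep] at *
  set r1 := rep '(' ')' s with hr1
  set r2 := rep '[' ']' r1 with hr2
  set r3 := rep '{' '}' r2 with hr3
  set r4 := rep '<' '>' r3 with hr4
  have m1 := rep_length_le '(' ')' s
  have m2 := rep_length_le '[' ']' r1
  have m3 := rep_length_le '{' '}' r2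
  have m4 := rep_length_le '<' '>' r3
  rw [← hr1] at m1; rw [← hr2] at m2; rw [← hr3] at m3; rw [← hr4] at m4
  by_contra hlt
  push_neg at hlt
  have hlen : r4.length = s.length := le_antisymm (by omega) hlt
  have e1 : r1 = s := by
    rcases rep_eq_or_lt '(' ')' s with h1 | h1
    · exact h1
    · rw [← hr1] at h1; omega
  have e2 : r2 = r1 := by
    rcases rep_eq_or_lt '[' ']' r1 with h1 | h1
    · exact h1
    · rw [← hr2] at h1; rw [e1] at *; omega
  have e3 : r3 = r2 := by
    rcases rep_eq_or_lt '{' '}' r2 with h1 | h1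
    · exact h1
    · rw [← hr3] at h1; rw [e2, e1] at *; omega
  have e4 : r4 = r3 := by
    rcases rep_eq_or_lt '<' '>' r3 with h1 | h1
    · exact h1
    · rw [← hr4] at h1; rw [e3, e2, e1] at *; omega
  exact h (by rw [e4, e3, e2, e1])

-- B's 'while s != prev' loop: iterate stepB until a fixpoint
def loopB (s : List Char) : List Char :=
  let t := stepB s
  if h : t = s then s else loopB t
termination_by s.length
decreasing_by exact stepB_length_lt s h

-- B's classification of the reduced line (the three returns after the while loop)
def finishB (s : List Char) : Option String :=
  if s = [] then none
  else if s.any (fun ch => !(PySem.Chars.isIn [ch] ['(', '[', '{', '<'])) then none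
  else
    -- s[::-1] is List.reverse; matching_chunks[c]: .getD default never used (openers only)
    some (String.ofList (PySem.Chars.join []
      ((s.reverse).map (fun ch => [(matchingChunks.get? ch).getD ch]))))

def get_completion_string_alt (line : String) : Option String :=
  -- "".join(line) is line itself for a string argument
  finishB (loopB line.toList)

-- ===== PRECONDITION & SPEC =====
-- Pre_ excludes lines that START with an opening bracket yet contain a non-bracket
-- character: on some of those A raises KeyError (the non-bracket char is scanned while
-- the stack is nonempty), and on the rest A returns None as an accident of treating the
-- char as a closer, which B also returns; separating the two would mean re-simulating A.
def isBracketChar (ch : Char) : Bool :=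
  ch == '(' || ch == ')' || ch == '[' || ch == ']' || ch == '{' || ch == '}' || ch == '<' || ch == '>'

def headNotOpening (l : List Char) : Bool :=
  match l with
  | [] => false
  | c :: _ => !(PySem.Set.contains openingChunks c)

def Pre_get_completion_string (line : String) : Prop :=
  (line.toList.all isBracketChar) = true ∨ headNotOpening line.toList = true
instance (line : String) : Decidable (Pre_get_completion_string line) := by
  unfold Pre_get_completion_string; infer_instance

def pvWitness_get_completion_string : String := "[("

def Spec_get_completion_string (line : String) (out : Option String) : Prop :=
  out = get_completion_string_alt line
instance (line : String) (out : Option String) : Decidable (Spec_get_completion_string line out) := by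
  unfold Spec_get_completion_string; infer_instance

-- ===== CLAIM (what is proved, stated in full; the proofs are below) =====
def Claim_equal_get_completion_string : Prop :=
  ∀ (line : String), Dom_get_completion_string line → Pre_get_completion_string line →
    Spec_get_completion_string line (get_completion_string line)

-- ===== LEMMAS AND PROOFS =====

def isBr (ch : Char) : Prop := ch ∈ ['(', ')', '[', ']', '{', '}', '<', '>']

def pairs : List (Char × Char) := [('(', ')'), ('[', ']'), ('{', '}'), ('<', '>')]

theorem rep_mem (o c : Char) (s : List Char) : ∀ x ∈ rep o c s, x ∈ s := by
  fun_induction rep o c s with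
  | case1 => simp
  | case2 a => simp
  | case3 a b t hcond ih => intro x hx; have := ih x hx; simp_all
  | case4 a b t hcond ih =>
      intro x hx
      rcases List.mem_cons.mp hx with rfl | hx'
      · simp
      · have := ih x hx'; simp_all

-- one cancellation step: A's scan ignores an adjacent matching pair
theorem goA_cancel {o c : Char} (hp : (o, c) ∈ pairs) (t st : List Char) :
    goA (o :: c :: t) st = goA t st := by
  fin_cases hp <;>
    simp [goA, PySem.List.pop?_last,
      show PySem.Set.contains openingChunks '(' = true from by decide,
      show PySem.Set.contains openingChunks '[' = true from by decide,
      show PySem.Set.contains openingChunks '{' = true from by decide,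
      show PySem.Set.contains openingChunks '<' = true from by decide,
      show PySem.Set.contains openingChunks ')' = false from by decide,
      show PySem.Set.contains openingChunks ']' = false from by decide,
      show PySem.Set.contains openingChunks '}' = false from by decide,
      show PySem.Set.contains openingChunks '>' = false from by decide,
      show matchingChunks.get? ')' = some '(' from by decide,
      show matchingChunks.get? ']' = some '[' from by decide,
      show matchingChunks.get? '}' = some '{' from by decide,
      show matchingChunks.get? '>' = some '<' from by decide,
      show ('(' ∈ openingChunks) from by decide,
      show ('[' ∈ openingChunks) from by decide,
      show ('{' ∈ openingChunks) from by decide,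
      show ('<' ∈ openingChunks) from by decide,
      show (')' ∉ openingChunks) from by decide,
      show (']' ∉ openingChunks) from by decide,
      show ('}' ∉ openingChunks) from by decide,
      show ('>' ∉ openingChunks) from by decide]

-- A's scan processes any char the same way in front of scan-equal tails
theorem goA_cons_congr {a : Char} {s₁ s₂ : List Char}
    (H : ∀ st, goA s₁ st = goA s₂ st) : ∀ st, goA (a :: s₁) st = goA (a :: s₂) st := by
  intro st
  simp only [goA]
  cases hoc : PySem.Set.contains openingChunks a with
  | true => simp [hoc, H]
  | false =>
      cases hpop : PySem.List.pop? st with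
      | none => simp [hoc, hpop]
      | some pr =>
          obtain ⟨top, st'⟩ := pr
          cases hget : matchingChunks.get? a with
          | none => simp [hoc, hpop, hget]
          | some m => simp [hoc, hpop, hget, H]

theorem goA_rep {o c : Char} (hp : (o, c) ∈ pairs) (s : List Char) :
    ∀ st, goA (rep o c s) st = goA s st := by
  fun_induction rep o c s with
  | case1 => intro st; rfl
  | case2 a => intro st; rfl
  | case3 a b t hcond ih =>
      obtain ⟨rfl, rfl⟩ := hcond
      intro st
      rw [goA_cancel hp t st]
      exact ih st
  | case4 a b t hcond ih => exact goA_cons_congr ih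

theorem goA_stepB (s : List Char) (st : List Char) :
    goA (stepB s) st = goA s st := by
  rw [stepB, replace_eq_rep, replace_eq_rep, replace_eq_rep, replace_eq_rep]
  rw [goA_rep (show ('<', '>') ∈ pairs by decide),
      goA_rep (show ('{', '}') ∈ pairs by decide),
      goA_rep (show ('[', ']') ∈ pairs by decide),
      goA_rep (show ('(', ')') ∈ pairs by decide)]

theorem stepB_mem (s : List Char) : ∀ x ∈ stepB s, x ∈ s := by
  simp only [stepB, replace_eq_rep]
  intro x hx
  exact rep_mem _ _ _ x (rep_mem _ _ _ x (rep_mem _ _ _ x (rep_mem _ _ _ x hx)))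

theorem goA_loopB (s : List Char) :
    goA (loopB s) [] = goA s [] := by
  fun_induction loopB s with
  | case1 s t h => rfl
  | case2 s t h ih => rw [ih]; exact goA_stepB s []

theorem loopB_mem (s : List Char) : ∀ x ∈ loopB s, x ∈ s := by
  fun_induction loopB s with
  | case1 s t h => intro x hx; exact hx
  | case2 s t h ih =>
      intro x hx
      exact stepB_mem s x (ih x hx)

theorem loopB_fix (s : List Char) : stepB (loopB s) = loopB s := by
  fun_induction loopB s with
  | case1 s t h => exact h
  | case2 s t h ih => exact ih

theorem rep_adj_lt (o c : Char) (u v : List Char) :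
    (rep o c (u ++ o :: c :: v)).length < (u ++ o :: c :: v).length := by
  induction u generalizing v with
  | nil =>
      simp only [List.nil_append, rep, and_self, if_true]
      have := rep_length_le o c v
      simp only [List.length_cons]
      omega
  | cons a u' ih =>
      obtain ⟨b, t, hbt⟩ : ∃ b t, u' ++ o :: c :: v = b :: t := by
        cases u' with
        | nil => exact ⟨o, c :: v, rfl⟩
        | cons b u'' => exact ⟨b, u'' ++ o :: c :: v, rfl⟩
      simp only [List.cons_append, hbt]
      rw [rep]
      split_ifs with hc
      · have h1 := rep_length_le o c t
        have h2 : (b :: t).length = (u' ++ o :: c :: v).length := by rw [hbt]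
        simp only [List.length_cons] at *
        omega
      · have h2 := ih v
        rw [hbt] at h2
        simp only [List.length_cons] at h2 ⊢
        omega

-- at a fixpoint of stepB, each of the four reps fixes s
theorem fix_reps {s : List Char} (hs : stepB s = s) :
    ∀ p ∈ pairs, rep p.1 p.2 s = s := by
  rw [stepB, replace_eq_rep, replace_eq_rep, replace_eq_rep, replace_eq_rep] at hs
  set r1 := rep '(' ')' s with hr1
  set r2 := rep '[' ']' r1 with hr2
  set r3 := rep '{' '}' r2 with hr3
  set r4 := rep '<' '>' r3 with hr4
  have m1 := rep_length_le '(' ')' s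
  have m2 := rep_length_le '[' ']' r1
  have m3 := rep_length_le '{' '}' r2
  have m4 := rep_length_le '<' '>' r3
  rw [← hr1] at m1; rw [← hr2] at m2; rw [← hr3] at m3; rw [← hr4] at m4
  have hlen : r4.length = s.length := by rw [hs]
  have e1 : r1 = s := by
    rcases rep_eq_or_lt '(' ')' s with h1 | h1
    · exact h1
    · rw [← hr1] at h1; omega
  have e2 : r2 = r1 := by
    rcases rep_eq_or_lt '[' ']' r1 with h1 | h1
    · exact h1
    · rw [← hr2] at h1; rw [e1] at *; omega
  have e3 : r3 = r2 := by
    rcases rep_eq_or_lt '{' '}' r2 with h1 | h1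
    · exact h1
    · rw [← hr3] at h1; rw [e2, e1] at *; omega
  have e4 : r4 = r3 := by
    rcases rep_eq_or_lt '<' '>' r3 with h1 | h1
    · exact h1
    · rw [← hr4] at h1; rw [e3, e2, e1] at *; omega
  intro p hp
  fin_cases hp
  · exact e1
  · rw [← e1, ← hr2]; exact e2
  · have h23 : r2 = s := by rw [e2, e1]
    rw [← h23, ← hr3]; exact e3
  · have h34 : r3 = s := by rw [e3, e2, e1]
    rw [← h34, ← hr4]
    exact hs.trans h34.symm

-- a fixpoint of stepB contains no adjacent matching pair
theorem fix_noAdj {s : List Char} (hs : stepB s = s) {o c : Char} (hp : (o, c) ∈ pairs)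
    (u v : List Char) : s ≠ u ++ o :: c :: v := by
  intro heq
  have h1 := fix_reps hs (o, c) hp
  have h2 := rep_adj_lt o c u v
  rw [← heq, h1] at h2
  exact lt_irrefl _ h2

def isOpenB (ch : Char) : Bool := PySem.Set.contains openingChunks ch

theorem goA_pushAll : ∀ (os : List Char), (∀ ch ∈ os, isOpenB ch = true) →
    ∀ (rest st : List Char), goA (os ++ rest) st = goA rest (st ++ os) := by
  intro os
  induction os with
  | nil => intro _ rest st; simp
  | cons a os' ih =>
      intro hos rest st
      rw [List.cons_append, goA, if_pos (show openingChunks.contains a = true from hos a List.mem_cons_self)]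
      rw [ih (fun ch h => hos ch (List.mem_cons_of_mem a h)) rest (st ++ [a])]
      rw [← List.append_cons]

theorem split_open (f : List Char) :
    (∀ ch ∈ f, isOpenB ch = true) ∨
    ∃ os c0 t, f = os ++ c0 :: t ∧ (∀ ch ∈ os, isOpenB ch = true) ∧ isOpenB c0 = false := by
  induction f with
  | nil => left; simp
  | cons a f' ih =>
      cases ha : isOpenB a with
      | false => right; exact ⟨[], a, f', rfl, by simp, ha⟩
      | true =>
        rcases ih with h | ⟨os, c0, t, rfl, hos, hc⟩
        · left
          intro ch hch
          rcases List.mem_cons.mp hch with rfl | h'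
          exacts [ha, h ch h']
        · right
          refine ⟨a :: os, c0, t, rfl, ?_, hc⟩
          intro ch hch
          rcases List.mem_cons.mp hch with rfl | h'
          exacts [ha, hos ch h']

-- final classification of an irreducible bracket string
theorem goA_final (f : List Char) (hb : ∀ ch ∈ f, isBr ch)
    (hna : ∀ o c, (o, c) ∈ pairs → ∀ u v, f ≠ u ++ o :: c :: v) :
    goA f [] = finishB f := by
  unfold finishB
  by_cases hf : f = []
  · subst hf; simp [goA]
  · rw [if_neg hf]
    rcases split_open f with hall | ⟨os, c0, t, hfeq, hos, hc0⟩
    · -- only opening chars: the reduced line is an incomplete chunk sequence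
      have hany : (f.any fun ch => !(PySem.Chars.isIn [ch] ['(', '[', '{', '<'])) = false := by
        rw [List.any_eq_false]
        intro x hx
        have hbx : x ∈ ['(', ')', '[', ']', '{', '}', '<', '>'] := hb x hx
        have hox := hall x hx
        fin_cases hbx <;> first
          | exact absurd hox (by decide)
          | decide
      rw [hany]
      simp only [Bool.false_eq_true, if_false]
      have hpush := goA_pushAll f hall [] []
      rw [List.append_nil, List.nil_append] at hpush
      rw [hpush, goA]
      rw [if_neg (by simpa using fun h => hf (List.length_eq_zero_iff.mp h))]
    · -- a closing char survived the reduction: A's scan rejects the line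
      have hbc0 : c0 ∈ ['(', ')', '[', ']', '{', '}', '<', '>'] := hb c0 (by rw [hfeq]; simp)
      have hcase : c0 = ')' ∨ c0 = ']' ∨ c0 = '}' ∨ c0 = '>' := by
        fin_cases hbc0 <;> first
          | exact absurd hc0 (by decide)
          | simp
      have hany : (f.any fun ch => !(PySem.Chars.isIn [ch] ['(', '[', '{', '<'])) = true := by
        rw [List.any_eq_true]
        refine ⟨c0, by rw [hfeq]; simp, ?_⟩
        rcases hcase with rfl | rfl | rfl | rfl <;> decide
      rw [hany, if_pos rfl]
      rw [hfeq, goA_pushAll os hos (c0 :: t) [], List.nil_append]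
      have hnotopen : ¬ PySem.Set.contains openingChunks c0 = true := by
        simpa [isOpenB] using hc0
      rw [goA, if_neg hnotopen]
      rcases os.eq_nil_or_concat with rfl | ⟨u, x, rfl⟩
      · simp
      · simp only [List.concat_eq_append] at hfeq hos ⊢
        rw [if_neg (by simp)]
        obtain ⟨o', hop, hget⟩ : ∃ o', (o', c0) ∈ pairs ∧ matchingChunks.get? c0 = some o' := by
          rcases hcase with rfl | rfl | rfl | rfl
          · exact ⟨'(', by decide, by decide⟩
          · exact ⟨'[', by decide, by decide⟩
          · exact ⟨'{', by decide, by decide⟩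
          · exact ⟨'<', by decide, by decide⟩
        rw [PySem.List.pop?_last, hget]
        show (if x ≠ o' then none else goA t u) = none
        have hxne : x ≠ o' := by
          intro hx
          exact hna o' c0 hop u t (by rw [hfeq, hx]; simp)
        rw [if_pos hxne]

theorem loopB_eq (s : List Char) :
    loopB s = if stepB s = s then s else loopB (stepB s) := by
  rw [loopB]
  by_cases h : stepB s = s
  · simp [h]
  · simp [h]

theorem rep_head (o c a : Char) (t : List Char) (ha : a ≠ o) :
    rep o c (a :: t) = a :: rep o c t := by
  cases t with
  | nil => simp [rep]
  | cons b t2 =>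
      rw [rep, if_neg]
      intro hcond
      exact ha hcond.1

theorem stepB_head (a : Char) (t : List Char)
    (ha : PySem.Set.contains openingChunks a = false) :
    ∃ t1, stepB (a :: t) = a :: t1 := by
  have h1 : a ≠ '(' := by intro h; rw [h] at ha; exact absurd ha (by decide)
  have h2 : a ≠ '[' := by intro h; rw [h] at ha; exact absurd ha (by decide)
  have h3 : a ≠ '{' := by intro h; rw [h] at ha; exact absurd ha (by decide)
  have h4 : a ≠ '<' := by intro h; rw [h] at ha; exact absurd ha (by decide)
  refine ⟨rep '<' '>' (rep '{' '}' (rep '[' ']' (rep '(' ')' t))), ?_⟩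
  rw [stepB, replace_eq_rep, replace_eq_rep, replace_eq_rep, replace_eq_rep,
      rep_head _ _ _ _ h1, rep_head _ _ _ _ h2, rep_head _ _ _ _ h3, rep_head _ _ _ _ h4]

theorem loopB_head (a : Char) (ha : PySem.Set.contains openingChunks a = false) :
    ∀ (n : Nat) (t : List Char), t.length ≤ n → ∃ t', loopB (a :: t) = a :: t' := by
  intro n
  induction n with
  | zero =>
      intro t hle
      by_cases hfix : stepB (a :: t) = a :: t
      · exact ⟨t, by rw [loopB_eq, if_pos hfix]⟩
      · obtain ⟨t1, ht1⟩ := stepB_head a t ha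
        have := stepB_length_lt (a :: t) hfix
        rw [ht1] at this
        simp only [List.length_cons] at this
        omega
  | succ n ih =>
      intro t hle
      by_cases hfix : stepB (a :: t) = a :: t
      · exact ⟨t, by rw [loopB_eq, if_pos hfix]⟩
      · obtain ⟨t1, ht1⟩ := stepB_head a t ha
        have hlt := stepB_length_lt (a :: t) hfix
        rw [ht1] at hlt
        simp only [List.length_cons] at hlt
        obtain ⟨t', ht'⟩ := ih t1 (by omega)
        exact ⟨t', by rw [loopB_eq, if_neg hfix, ht1, ht']⟩

theorem isIn_singleton (c : Char) (l : List Char) :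
    PySem.Chars.isIn [c] l = l.contains c := by
  cases h : l.contains c with
  | true =>
      rw [PySem.Chars.isIn_iff_infix]
      obtain ⟨l1, l2, rfl⟩ := List.append_of_mem (List.contains_iff_mem.mp h)
      exact ⟨l1, l2, by simp⟩
  | false =>
      rw [PySem.Chars.isIn_eq_false_iff]
      intro hinf
      have hc : c ∈ l := hinf.subset (by simp)
      rw [← List.contains_iff_mem] at hc
      rw [h] at hc
      exact absurd hc (by simp)

-- ===== VERDICT (by name: the statement is the Claim_ definition above) =====
theorem get_completion_string_spec : Claim_equal_get_completion_string := by
  intro line _ hpre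
  unfold Spec_get_completion_string get_completion_string get_completion_string_alt
  rcases hpre with hbrk | hho
  · -- bracket-only line: the reduction preserves A's scan, then classify the fixpoint
    have hb : ∀ ch ∈ line.toList, isBr ch := by
      intro ch hch
      have h := List.all_eq_true.mp hbrk ch hch
      simp only [isBracketChar, Bool.or_eq_true, beq_iff_eq] at h
      simp only [isBr, List.mem_cons, List.not_mem_nil, or_false]
      tauto
    rw [(goA_loopB line.toList).symm]
    exact goA_final (loopB line.toList)
      (fun ch hch => hb ch (loopB_mem line.toList ch hch))
      (fun o c hp u v => fix_noAdj (loopB_fix line.toList) hp u v)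
  · -- the line starts with a non-opening char: both return None
    cases hl : line.toList with
    | nil => rw [hl] at hho; simp [headNotOpening] at hho
    | cons c0 rest =>
        have hc0 : PySem.Set.contains openingChunks c0 = false := by
          rw [hl] at hho
          simpa [headNotOpening] using hho
        obtain ⟨t', ht'⟩ := loopB_head c0 hc0 rest.length rest le_rfl
        have hany : ((c0 :: t').any fun ch => !(PySem.Chars.isIn [ch] ['(', '[', '{', '<'])) = true := by
          rw [List.any_eq_true]
          refine ⟨c0, by simp, ?_⟩
          rw [Bool.not_eq_eq_eq_not, Bool.not_true, isIn_singleton]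
          have hoc : openingChunks = ['(', '[', '{', '<'] := by decide
          rw [← hoc]
          exact hc0
        rw [ht', finishB, if_neg (by simp), if_pos hany]
        rw [goA, if_neg (by rw [hc0]; simp), if_pos (by simp)]
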